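-- pv_equiv track=rewrite | github.com/Pummelchen/FXAI | FXAI/Tools/offline_lab/newspulse_fusion.py | _pair_universe
-- ===== SOURCE A (Python) =====
-- def _pair_universe(currencies: list[str], include_permutations: bool) -> list[str]:
--     pairs: list[str] = []
--     for base in currencies:
--         for quote in currencies:
--             if base == quote:
--                 continue
--             if not include_permutations and base > quote:
--                 continue
--             pairs.append(base + quote)
--     return sorted(set(pairs))
-- ===== SOURCE B (Python) =====
-- def _pair_universe(currencies: list[str], include_permutations: bool) -> list[str]:
--     pairs: list[str] = []
--     rest = sorted(set(currencies))
--     while rest: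
--         a = rest[0]
--         rest = rest[1:]
--         for b in rest:
--             pairs.append(a + b)
--             if include_permutations:
--                 pairs.append(b + a)
--     return sorted(set(pairs))
-- ===== Notes on version B (the rewrite author's own statement) =====
-- stated objective: simpler
-- what changed: B sorts and dedupes the currencies once, then walks the sorted unique list generating each unordered pair exactly once from suffixes (emitting the mirrored pair only when permutations are wanted), so both per-iteration guards (base==quote, base>quote) of A's full n*n double scan disappear and the quadratic generation runs over the deduped list only.
import Mathlib
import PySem

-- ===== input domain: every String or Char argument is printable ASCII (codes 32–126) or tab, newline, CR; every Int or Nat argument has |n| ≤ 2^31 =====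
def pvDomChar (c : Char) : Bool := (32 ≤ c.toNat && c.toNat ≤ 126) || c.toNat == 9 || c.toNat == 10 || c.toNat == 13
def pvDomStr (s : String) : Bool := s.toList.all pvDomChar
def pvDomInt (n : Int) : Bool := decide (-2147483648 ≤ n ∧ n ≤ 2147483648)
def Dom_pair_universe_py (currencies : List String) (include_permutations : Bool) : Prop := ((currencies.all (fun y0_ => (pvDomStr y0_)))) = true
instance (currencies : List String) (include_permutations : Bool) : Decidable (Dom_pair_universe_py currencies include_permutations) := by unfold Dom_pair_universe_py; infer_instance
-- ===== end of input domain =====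

-- B sorts and dedupes the currencies once, then generates each unordered pair exactly once
-- from suffixes of that sorted unique list (mirroring it only when permutations are wanted),
-- dropping A's per-iteration equality/order guards over the full n×n scan. Objective: simpler.

-- ===== PORT A =====
def pair_universe_py (currencies : List String) (include_permutations : Bool) : List String :=
  let pairs := currencies.foldl (fun acc base =>
    currencies.foldl (fun acc quote =>
      if base == quote then acc
      else if !include_permutations && decide (quote < base) then acc
      else acc ++ [base ++ quote]) acc) []
  PySem.List.sorted (PySem.Set.ofList pairs) (fun x => x) false

-- ===== PORT B =====
-- the 'while rest:' loop of Source B: peel the head, pair it with every later element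
def pvBLoop (perm : Bool) (pairs : List String) : List String → List String
  | [] => pairs
  | a :: rest =>
    pvBLoop perm
      (rest.foldl (fun acc b =>
        if perm then (acc ++ [a ++ b]) ++ [b ++ a] else acc ++ [a ++ b]) pairs) rest

def pair_universe_py_alt (currencies : List String) (include_permutations : Bool) : List String :=
  let pairs := pvBLoop include_permutations []
    (PySem.List.sorted (PySem.Set.ofList currencies) (fun x => x) false)
  PySem.List.sorted (PySem.Set.ofList pairs) (fun x => x) false

-- ===== PRECONDITION & SPEC =====
def Spec_pair_universe_py (currencies : List String) (include_permutations : Bool) (out : List String) : Prop := out = pair_universe_py_alt currencies include_permutations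
instance (currencies : List String) (include_permutations : Bool) (out : List String) : Decidable (Spec_pair_universe_py currencies include_permutations out) := by unfold Spec_pair_universe_py; infer_instance

-- ===== CLAIM (what is proved, stated in full; the proofs are below) =====
def Claim_equal_pair_universe_py : Prop := ∀ (currencies : List String) (include_permutations : Bool), Dom_pair_universe_py currencies include_permutations → Spec_pair_universe_py currencies include_permutations (pair_universe_py currencies include_permutations)

-- ===== LEMMAS AND PROOFS =====

-- sorted(set(l1)) = sorted(set(l2)) whenever l1 and l2 have the same members
theorem pv_sortedSet_congr (l1 l2 : List String) (h : ∀ x, x ∈ l1 ↔ x ∈ l2) :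
    PySem.List.sorted (PySem.Set.ofList l1) (fun x => x) false
      = PySem.List.sorted (PySem.Set.ofList l2) (fun x => x) false := by
  apply PySem.List.sorted_eq_sorted_of_perm _ _ _ (fun a b hab => hab)
  refine (List.perm_ext_iff_of_nodup (PySem.Set.nodup_ofList _) (PySem.Set.nodup_ofList _)).2 ?_
  intro x; simp [PySem.Set.mem_ofList, h x]

-- A's pair list as a flatMap
theorem pv_pairsA_eq (currencies : List String) (perm : Bool) :
    currencies.foldl (fun acc base =>
      currencies.foldl (fun acc quote =>
        if base == quote then acc
        else if !perm && decide (quote < base) then acc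
        else acc ++ [base ++ quote]) acc) []
    = currencies.flatMap (fun base => currencies.flatMap (fun quote =>
        if base == quote then []
        else if !perm && decide (quote < base) then []
        else [base ++ quote])) := by
  have hinner : ∀ (base : String) (acc : List String),
      currencies.foldl (fun acc quote =>
        if base == quote then acc
        else if !perm && decide (quote < base) then acc
        else acc ++ [base ++ quote]) acc
      = acc ++ currencies.flatMap (fun quote =>
        if base == quote then []
        else if !perm && decide (quote < base) then []
        else [base ++ quote]) := by
    intro base acc
    rw [← PySem.List.foldl_append_eq_flatMap]
    apply PySem.List.foldl_congr_mem
    intro acc' q _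
    split_ifs <;> simp
  have houter := PySem.List.foldl_congr_mem (l := currencies) (init := ([] : List String))
    (f := fun acc base => currencies.foldl (fun acc quote =>
      if base == quote then acc
      else if !perm && decide (quote < base) then acc
      else acc ++ [base ++ quote]) acc)
    (g := fun acc base => acc ++ currencies.flatMap (fun quote =>
      if base == quote then []
      else if !perm && decide (quote < base) then []
      else [base ++ quote]))
    (fun acc b _ => hinner b acc)
  rw [houter, PySem.List.foldl_append_eq_flatMap, List.nil_append]

theorem pv_mem_pairsA (currencies : List String) (perm : Bool) (x : String) :
    (x ∈ currencies.flatMap (fun base => currencies.flatMap (fun quote =>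
        if base == quote then []
        else if !perm && decide (quote < base) then []
        else [base ++ quote])))
    ↔ ∃ a, a ∈ currencies ∧ ∃ b, b ∈ currencies ∧
        a ≠ b ∧ (perm = true ∨ ¬ b < a) ∧ x = a ++ b := by
  simp only [List.mem_flatMap]
  constructor
  · rintro ⟨a, ha, b, hb, hx⟩
    refine ⟨a, ha, b, hb, ?_⟩
    split_ifs at hx with h1 h2
    · simp at hx
    · simp at hx
    · simp at hx
      refine ⟨by simpa using h1, ?_, hx⟩
      cases perm
      · right; simpa using h2
      · left; rfl
  · rintro ⟨a, ha, b, hb, hne, hg, rfl⟩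
    refine ⟨a, ha, b, hb, ?_⟩
    have hc : ¬ ((!perm && decide (b < a)) = true) := by
      rcases hg with hp | h
      · simp [hp]
      · simp [h]
    rw [if_neg (by simpa using hne), if_neg hc]
    simp

-- B's loop as an accumulator-free generator
def pvGenB (perm : Bool) : List String → List String
  | [] => []
  | a :: rest =>
    rest.flatMap (fun b => if perm then [a ++ b, b ++ a] else [a ++ b]) ++ pvGenB perm rest

theorem pv_bLoop_eq (perm : Bool) (l : List String) (pairs : List String) :
    pvBLoop perm pairs l = pairs ++ pvGenB perm l := by
  induction l generalizing pairs with
  | nil => simp [pvBLoop, pvGenB]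
  | cons a rest ih =>
    have hstep : rest.foldl (fun acc b =>
        if perm then (acc ++ [a ++ b]) ++ [b ++ a] else acc ++ [a ++ b]) pairs
        = pairs ++ rest.flatMap (fun b => if perm then [a ++ b, b ++ a] else [a ++ b]) := by
      rw [← PySem.List.foldl_append_eq_flatMap]
      apply PySem.List.foldl_congr_mem
      intro acc b _
      cases perm <;> simp
    rw [pvBLoop, ih, hstep, pvGenB, List.append_assoc]

theorem pv_mem_genB (perm : Bool) (l : List String) (hl : l.Pairwise (· < ·)) (x : String) :
    x ∈ pvGenB perm l ↔ ∃ a, a ∈ l ∧ ∃ b, b ∈ l ∧ a < b ∧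
      (x = a ++ b ∨ (perm = true ∧ x = b ++ a)) := by
  induction l with
  | nil => simp [pvGenB]
  | cons a rest ih =>
    have ha : ∀ b ∈ rest, a < b := (List.pairwise_cons.1 hl).1
    have hrest := (List.pairwise_cons.1 hl).2
    simp only [pvGenB, List.mem_append, List.mem_flatMap, ih hrest]
    constructor
    · rintro (⟨b, hb, hx⟩ | ⟨u, hu, v, hv, huv, hx⟩)
      · refine ⟨a, List.mem_cons_self .., b, List.mem_cons_of_mem _ hb, ha b hb, ?_⟩
        cases perm <;> simp_all
      · exact ⟨u, List.mem_cons_of_mem _ hu, v, List.mem_cons_of_mem _ hv, huv, hx⟩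
    · rintro ⟨u, hu, v, hv, huv, hx⟩
      by_cases hva : v = a
      · subst hva
        have hu' : u ∈ rest := by
          rcases List.mem_cons.1 hu with h | h
          · exact absurd huv (by rw [h]; exact lt_irrefl _)
          · exact h
        exact absurd huv (not_lt_of_gt (ha u hu'))
      · have hv' : v ∈ rest := (List.mem_cons.1 hv).resolve_left hva
        rcases List.mem_cons.1 hu with hua | hu'
        · subst hua
          left
          refine ⟨v, hv', ?_⟩
          cases perm <;> simp_all
        · exact Or.inr ⟨u, hu', v, hv', huv, hx⟩

-- ===== VERDICT (by name: the statement is the Claim_ definition above) =====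
theorem pair_universe_py_spec : Claim_equal_pair_universe_py := by
  intro currencies perm _
  unfold Spec_pair_universe_py pair_universe_py pair_universe_py_alt
  rw [pv_pairsA_eq, pv_bLoop_eq]
  apply pv_sortedSet_congr
  intro x
  rw [pv_mem_pairsA]
  rw [List.nil_append,
    pv_mem_genB perm _ (PySem.List.sorted_ofList_pairwise_lt currencies) x]
  have hmem : ∀ y : String,
      y ∈ PySem.List.sorted (PySem.Set.ofList currencies) (fun x => x) false
        ↔ y ∈ currencies := by
    intro y; rw [PySem.List.mem_sorted, PySem.Set.mem_ofList]
  constructor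
  · rintro ⟨a, ha, b, hb, hne, hg, rfl⟩
    rcases lt_or_gt_of_ne hne with hab | hba
    · exact ⟨a, (hmem a).2 ha, b, (hmem b).2 hb, hab, Or.inl rfl⟩
    · rcases hg with hp | hnb
      · exact ⟨b, (hmem b).2 hb, a, (hmem a).2 ha, hba, Or.inr ⟨hp, rfl⟩⟩
      · exact absurd hba hnb
  · rintro ⟨u, hu, v, hv, huv, hx | ⟨hp, hx⟩⟩
    · exact ⟨u, (hmem u).1 hu, v, (hmem v).1 hv, ne_of_lt huv,
        Or.inr (not_lt_of_gt huv), hx⟩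
    · exact ⟨v, (hmem v).1 hv, u, (hmem u).1 hu, (ne_of_lt huv).symm,
        Or.inl hp, hx⟩
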